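-- pv_equiv track=rewrite | github.com/wangyendt/LeetCode | Contests/201-300/week 292/2266. Count Number of Texts/Count Number of Texts.py | countTexts
-- ===== SOURCE A (Python) =====
-- def countTexts(pressedKeys: str) -> int:
--     MOD = pow(10, 9) + 7
--     dp = [0] * (len(pressedKeys) + 1)
--     dp[0] = 1
--     for i in range(1, len(pressedKeys) + 1):
--         dp[i] = dp[i - 1] % MOD
--         if i - 2 >= 0 and pressedKeys[i - 1] == pressedKeys[i - 2]:
--             dp[i] = (dp[i] + dp[i - 2]) % MOD
--             if i - 3 >= 0 and pressedKeys[i - 1] == pressedKeys[i - 3]: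
--                 dp[i] = (dp[i] + dp[i - 3]) % MOD
--                 if pressedKeys[i - 1] in "79" and i - 4 >= 0 and pressedKeys[i - 1] == pressedKeys[i - 4]:
--                     dp[i] = (dp[i] + dp[i - 4]) % MOD
--     return dp[-1]
-- ===== SOURCE B (Python) =====
-- def countTexts(pressedKeys: str) -> int:
--     MOD = 10 ** 9 + 7
--     total = 1
--     i = 0
--     n = len(pressedKeys)
--     while i < n:
--         # take the maximal run of equal characters starting at i
--         j = i + 1
--         while j < n and pressedKeys[j] == pressedKeys[i]:
--             j += 1
--         L = j - i
--         limit = 4 if pressedKeys[i] in "79" else 3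
--         # f[k] = number of ways to split a run of length k into presses of 1..limit
--         f = [1]
--         for k in range(1, L + 1):
--             f.append(sum(f[max(0, k - limit):]) % MOD)
--         total = total * f[L] % MOD
--         i = j
--     return total
-- ===== Notes on version B (the rewrite author's own statement) =====
-- stated objective: alternative
-- what changed: A fills one dp table over the whole string with up-to-4 lookback terms guarded by character comparisons; B instead splits the input into maximal runs of equal keys, computes for each run of length L the number of compositions of L into presses of size 1..3 (1..4 for '7'/'9') by a small per-run table, and multiplies the per-run counts modulo 1e9+7.
import Mathlib
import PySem

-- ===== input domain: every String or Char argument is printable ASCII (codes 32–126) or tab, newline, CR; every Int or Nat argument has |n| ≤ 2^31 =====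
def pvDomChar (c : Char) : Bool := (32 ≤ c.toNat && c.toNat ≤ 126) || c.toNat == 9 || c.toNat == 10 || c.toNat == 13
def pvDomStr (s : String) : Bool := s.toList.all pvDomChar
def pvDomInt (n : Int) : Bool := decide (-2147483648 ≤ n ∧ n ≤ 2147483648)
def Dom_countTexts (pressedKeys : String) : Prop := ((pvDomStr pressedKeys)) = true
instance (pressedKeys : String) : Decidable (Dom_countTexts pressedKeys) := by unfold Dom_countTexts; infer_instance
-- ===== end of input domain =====

-- B replaces A's whole-string DP by a scan into maximal runs with a per-run
-- composition count (parts 1..3, or 1..4 for '7'/'9') multiplied together mod 1e9+7.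

def pvM : Int := 1000000007

-- ===== PORT A =====
-- one iteration of A's loop at loop index i (1-based); dp grows by one cell per step
def stepA (cs : List Char) (dp : List Int) (i : Nat) : List Int :=
  let v1 := dp.getD (i - 1) 0 % pvM
  let v :=
    if 2 ≤ i ∧ cs.getD (i - 1) ' ' = cs.getD (i - 2) ' ' then
      let v2 := (v1 + dp.getD (i - 2) 0) % pvM
      if 3 ≤ i ∧ cs.getD (i - 1) ' ' = cs.getD (i - 3) ' ' then
        let v3 := (v2 + dp.getD (i - 3) 0) % pvM
        -- `pressedKeys[i-1] in "79"` ported as the two-character disjunction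
        if (cs.getD (i - 1) ' ' = '7' ∨ cs.getD (i - 1) ' ' = '9') ∧ 4 ≤ i ∧
            cs.getD (i - 1) ' ' = cs.getD (i - 4) ' ' then
          (v3 + dp.getD (i - 4) 0) % pvM
        else v3
      else v2
    else v1
  dp ++ [v]

def countTexts (pressedKeys : String) : Int :=
  let cs := pressedKeys.toList
  let dp := (List.range' 1 cs.length).foldl (stepA cs) [1]
  dp.getD cs.length 0   -- dp[-1]

-- ===== PORT B =====
-- split off the maximal run of `c` from the front: (extra length, remainder)
def takeRun (c : Char) : List Char → Nat × List Char
  | [] => (0, [])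
  | d :: t => if d = c then ((takeRun c t).1 + 1, (takeRun c t).2) else (0, d :: t)

theorem takeRun_len_le (c : Char) (t : List Char) : (takeRun c t).2.length ≤ t.length := by
  induction t with
  | nil => simp [takeRun]
  | cons d t ih =>
    by_cases h : d = c
    · simp [takeRun, h]; omega
    · simp [takeRun, h]

-- table f[0..L] of composition counts with parts of size 1..limit, mod pvM
def fTab (limit L : Nat) : List Int :=
  (List.range' 1 L).foldl (fun f k => f ++ [(f.drop (k - limit)).sum % pvM]) [1]

def loopB : List Char → Int → Int
  | [], total => total
  | c :: t, total =>
    loopB (takeRun c t).2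
      (total * (fTab (if c = '7' ∨ c = '9' then 4 else 3)
                  ((takeRun c t).1 + 1)).getD ((takeRun c t).1 + 1) 0 % pvM)
  termination_by cs _ => cs.length
  decreasing_by have := takeRun_len_le c t; simp only [List.length_cons]; omega

def countTexts_alt (pressedKeys : String) : Int := loopB pressedKeys.toList 1

-- ===== PRECONDITION & SPEC =====
def Spec_countTexts (pressedKeys : String) (out : Int) : Prop := out = countTexts_alt pressedKeys
instance (pressedKeys : String) (out : Int) : Decidable (Spec_countTexts pressedKeys out) := by unfold Spec_countTexts; infer_instance

-- ===== CLAIM (what is proved, stated in full; the proofs are below) =====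
def Claim_equal_countTexts : Prop := ∀ (pressedKeys : String), Dom_countTexts pressedKeys → Spec_countTexts pressedKeys (countTexts pressedKeys)

-- ===== LEMMAS AND PROOFS =====

-- mod-arithmetic helpers
theorem pvMC (x : Int) : x % pvM % pvM = x % pvM := by
  simp

theorem pvMA (x y : Int) : (x % pvM + y) % pvM = (x + y) % pvM := by
  simp

theorem pvMul (p x : Int) : p * (x % pvM) % pvM = p * x % pvM := by
  conv_lhs => rw [Int.mul_emod, pvMC, ← Int.mul_emod]

theorem pvMulL (p x : Int) : (x % pvM) * p % pvM = x * p % pvM := by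
  rw [mul_comm, pvMul, mul_comm]

theorem pvMB (x y : Int) : (x + y % pvM) % pvM = (x + y) % pvM := by
  simp

theorem pvMAdd (p x y : Int) : p * ((x % pvM + y) % pvM) % pvM = (p * x % pvM + p * y) % pvM := by
  rw [pvMul, mul_add, ← pvMA (p * (x % pvM)), pvMul]

theorem pvMAdd2 (p x y z : Int) :
    p * (((x % pvM + y) % pvM + z) % pvM) % pvM = ((p * x % pvM + p * y) % pvM + p * z) % pvM := by
  rw [pvMul, mul_add, ← pvMA (p * ((x % pvM + y) % pvM)), pvMAdd]

theorem pvMAdd3 (p x y z w : Int) :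
    p * ((((x % pvM + y) % pvM + z) % pvM + w) % pvM) % pvM
      = (((p * x % pvM + p * y) % pvM + p * z) % pvM + p * w) % pvM := by
  rw [pvMul, mul_add, ← pvMA (p * ((((x % pvM + y) % pvM + z) % pvM))), pvMAdd2]

theorem pvAssoc (t p q : Int) : (t * p % pvM) * q % pvM = t * (p * q % pvM) % pvM := by
  rw [pvMulL, mul_assoc, pvMul]

-- A's dp value at index i, as a recurrence (proof-side mirror of stepA)
def dpF (cs : List Char) : Nat → Int
  | 0 => 1
  | i+1 =>
    let v1 := dpF cs i % pvM
    if 2 ≤ i+1 ∧ cs.getD i ' ' = cs.getD (i-1) ' ' then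
      let v2 := (v1 + dpF cs (i-1)) % pvM
      if 3 ≤ i+1 ∧ cs.getD i ' ' = cs.getD (i-2) ' ' then
        let v3 := (v2 + dpF cs (i-2)) % pvM
        if (cs.getD i ' ' = '7' ∨ cs.getD i ' ' = '9') ∧ 4 ≤ i+1 ∧ cs.getD i ' ' = cs.getD (i-3) ' ' then
          (v3 + dpF cs (i-3)) % pvM
        else v3
      else v2
    else v1
  termination_by k => k
  decreasing_by all_goals omega

-- composition-count recurrence (proof-side mirror of fTab's rows)
def fF (limit : Nat) : Nat → Int
  | 0 => 1
  | i+1 =>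
    let v1 := fF limit i % pvM
    if 2 ≤ i+1 then
      let v2 := (v1 + fF limit (i-1)) % pvM
      if 3 ≤ i+1 then
        let v3 := (v2 + fF limit (i-2)) % pvM
        if limit = 4 ∧ 4 ≤ i+1 then (v3 + fF limit (i-3)) % pvM else v3
      else v2
    else v1
  termination_by k => k
  decreasing_by all_goals omega

def limitOf (c : Char) : Nat := if c = '7' ∨ c = '9' then 4 else 3

theorem dpF_mod (cs : List Char) (i : Nat) : dpF cs (i+1) % pvM = dpF cs (i+1) := by
  rw [dpF]; split_ifs <;> simp

theorem getD_map_range (f : Nat → Int) (n j : Nat) (h : j < n) :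
    ((List.range n).map f).getD j 0 = f j := by
  rw [List.getD_eq_getElem?_getD]
  simp [h]

-- A's loop builds exactly the table of dpF values
theorem loopA_inv (cs : List Char) (m : Nat) :
    (List.range' 1 m).foldl (stepA cs) [1] = (List.range (m+1)).map (dpF cs) := by
  induction m with
  | zero => simp [dpF]
  | succ m ih =>
    rw [List.range'_concat, List.foldl_append, ih]
    have hone : 1 + 1 * m = m + 1 := by omega
    rw [hone, List.foldl_cons, List.foldl_nil]
    conv_rhs => rw [List.range_succ, List.map_append, List.map_cons, List.map_nil]
    unfold stepA
    have e1 : m + 1 - 1 = m := by omega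
    have e2 : m + 1 - 2 = m - 1 := by omega
    have e3 : m + 1 - 3 = m - 2 := by omega
    have e4 : m + 1 - 4 = m - 3 := by omega
    simp only [e1, e2, e3, e4,
        getD_map_range (dpF cs) (m+1) m (by omega),
        getD_map_range (dpF cs) (m+1) (m-1) (by omega),
        getD_map_range (dpF cs) (m+1) (m-2) (by omega),
        getD_map_range (dpF cs) (m+1) (m-3) (by omega)]
    congr 1
    conv_rhs => rw [dpF]

theorem countTexts_eq_dpF (s : String) :
    countTexts s = dpF s.toList s.toList.length := by
  simp only [countTexts]
  rw [loopA_inv, getD_map_range (dpF s.toList) (s.toList.length + 1) s.toList.length (by omega)]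

-- fTab builds the table of fF values
theorem fF_sum (limit k : Nat) (hl : limit = 3 ∨ limit = 4) (hk : 1 ≤ k) :
    ((List.range' (k - limit) (k - (k - limit))).map (fF limit)).sum % pvM = fF limit k := by
  have hf0 : fF limit 0 = 1 := by rw [fF]
  have hf1 : fF limit 1 = fF limit 0 % pvM := by
    conv_lhs => rw [fF]
    norm_num
  have hf2 : fF limit 2 = (fF limit 1 % pvM + fF limit 0) % pvM := by
    conv_lhs => rw [fF]
    norm_num
  have hf3 : fF limit 3 = ((fF limit 2 % pvM + fF limit 1) % pvM + fF limit 0) % pvM := by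
    conv_lhs => rw [fF]
    have : ¬ (limit = 4 ∧ 4 ≤ 2 + 1) := by omega
    norm_num [this]
  have h4 : k = 1 ∨ k = 2 ∨ k = 3 ∨ 4 ≤ k := by omega
  rcases h4 with rfl | rfl | rfl | hge
  · rcases hl with rfl | rfl <;>
    · norm_num [List.range', hf1, hf0]
  · rcases hl with rfl | rfl <;>
    · norm_num [List.range', hf2, hf0]
      generalize fF _ 1 = a
      simp only [pvM]; omega
  · rcases hl with rfl | rfl <;>
    · norm_num [List.range', hf3, hf0]
      generalize fF _ 1 = a
      generalize fF _ 2 = b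
      simp only [pvM]; omega
  · obtain ⟨j, rfl⟩ : ∃ j, k = j + 4 := ⟨k - 4, by omega⟩
    have hfj : fF limit (j + 4) =
        if limit = 4 ∧ 4 ≤ j + 3 + 1 then
          ((((fF limit (j+3) % pvM + fF limit (j+2)) % pvM) + fF limit (j+1)) % pvM + fF limit j) % pvM
        else (((fF limit (j+3) % pvM + fF limit (j+2)) % pvM) + fF limit (j+1)) % pvM := by
      conv_lhs => rw [show j + 4 = (j + 3) + 1 from rfl, fF]
      have e2 : j + 3 - 1 = j + 2 := by omega
      have e3 : j + 3 - 2 = j + 1 := by omega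
      have e4 : j + 3 - 3 = j := by omega
      rw [e2, e3, e4]
      have c1 : 2 ≤ j + 3 + 1 := by omega
      have c2 : 3 ≤ j + 3 + 1 := by omega
      simp only [if_pos c1, if_pos c2]
    rcases hl with rfl | rfl
    · have e : j + 4 - 3 = j + 1 := by omega
      have e' : j + 4 - (j + 1) = 3 := by omega
      rw [e, e', hfj]
      have : ¬ ((3:Nat) = 4 ∧ 4 ≤ j + 3 + 1) := by omega
      rw [if_neg this]
      norm_num [List.range']
      generalize fF 3 (j+1) = a
      generalize fF 3 (j+2) = b
      generalize fF 3 (j+3) = c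
      simp only [pvM]; omega
    · have e : j + 4 - 4 = j := by omega
      have e' : j + 4 - j = 4 := by omega
      rw [e, e', hfj]
      have : ((4:Nat) = 4 ∧ 4 ≤ j + 3 + 1) := by omega
      rw [if_pos this]
      norm_num [List.range']
      generalize fF 4 j = d
      generalize fF 4 (j+1) = a
      generalize fF 4 (j+2) = b
      generalize fF 4 (j+3) = c
      simp only [pvM]; omega

theorem fTab_eq (limit L : Nat) (hl : limit = 3 ∨ limit = 4) :
    fTab limit L = (List.range (L+1)).map (fF limit) := by
  induction L with
  | zero => simp [fTab, fF]
  | succ L ih =>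
    unfold fTab at ih ⊢
    rw [List.range'_concat, List.foldl_append, ih, List.foldl_cons, List.foldl_nil]
    have hone : 1 + 1 * L = L + 1 := by omega
    rw [hone, List.range_succ (n := L + 1), List.map_append]
    congr 1
    rw [← List.map_drop, List.range_eq_range', List.drop_range']
    rw [List.map_cons, List.map_nil]
    congr 1
    have hz : 0 + (L + 1 - limit) * 1 = L + 1 - limit := by omega
    rw [hz]
    exact fF_sum limit (L+1) hl (by omega)

-- getD on a replicate-prefixed list
theorem getD_rep (c : Char) (L : Nat) (rest : List Char) (i : Nat) (h : i < L) :
    (List.replicate L c ++ rest).getD i ' ' = c := by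
  rw [List.getD_append _ _ _ _ (by simpa using h)]
  exact List.getD_replicate _ h

theorem getD_right (c : Char) (L : Nat) (rest : List Char) (i : Nat) :
    (List.replicate L c ++ rest).getD (L + i) ' ' = rest.getD i ' ' := by
  rw [List.getD_append_right _ _ _ _ (by simp)]
  simp

theorem limitOf_four (c : Char) : (limitOf c = 4) = (c = '7' ∨ c = '9') := by
  unfold limitOf
  by_cases h : c = '7' ∨ c = '9' <;> simp [h]

-- within the leading run every dpF value is an fF value
theorem dpF_run (c : Char) (L : Nat) (rest : List Char) :
    ∀ k, k ≤ L → dpF (List.replicate L c ++ rest) k = fF (limitOf c) k := by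
  intro k
  induction k using Nat.strong_induction_on with
  | _ k ih =>
    intro hk
    rcases k with _ | k
    · rw [dpF, fF]
    · rw [dpF, fF]
      have g0 := getD_rep c L rest k (by omega)
      have g1 := getD_rep c L rest (k-1) (by omega)
      have g2 := getD_rep c L rest (k-2) (by omega)
      have g3 := getD_rep c L rest (k-3) (by omega)
      simp only [g0, g1, g2, g3]
      rw [ih k (by omega) (by omega), ih (k-1) (by omega) (by omega),
          ih (k-2) (by omega) (by omega), ih (k-3) (by omega) (by omega)]
      simp only [limitOf_four, and_true]

-- small dpF evaluations
theorem dpF_zero (l : List Char) : dpF l 0 = 1 := by rw [dpF]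

theorem dpF_one (l : List Char) : dpF l 1 = 1 % pvM := by
  conv_lhs => rw [dpF]
  norm_num [dpF_zero]

theorem dpF_two (l : List Char) :
    dpF l 2 = if l.getD 1 ' ' = l.getD 0 ' ' then (dpF l 1 % pvM + 1) % pvM
              else dpF l 1 % pvM := by
  conv_lhs => rw [dpF]
  norm_num [dpF_zero]

theorem dpF_three (l : List Char) :
    dpF l 3 = if l.getD 2 ' ' = l.getD 1 ' ' then
                (if l.getD 2 ' ' = l.getD 0 ' ' then
                   ((dpF l 2 % pvM + dpF l 1) % pvM + 1) % pvM
                 else (dpF l 2 % pvM + dpF l 1) % pvM)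
              else dpF l 2 % pvM := by
  conv_lhs => rw [dpF]
  norm_num [dpF_zero]

-- past the leading run, dpF factorizes
theorem dpF_scale (c : Char) (L : Nat) (rest : List Char) (hL : 1 ≤ L)
    (hr : rest.head? ≠ some c) :
    ∀ j, j ≤ rest.length →
      dpF (List.replicate L c ++ rest) (L + j)
        = dpF (List.replicate L c ++ rest) L * dpF rest j % pvM := by
  have hP : dpF (List.replicate L c ++ rest) L % pvM = dpF (List.replicate L c ++ rest) L := by
    obtain ⟨l, rfl⟩ : ∃ l, L = l + 1 := ⟨L - 1, by omega⟩
    exact dpF_mod _ _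
  have hhead : 0 < rest.length → rest.getD 0 ' ' ≠ c := by
    rcases rest with _ | ⟨x, rs⟩
    · simp
    · intro _
      simpa using hr
  have gr0 : (List.replicate L c ++ rest).getD L ' ' = rest.getD 0 ' ' := by
    simpa using getD_right c L rest 0
  have gl1 : (List.replicate L c ++ rest).getD (L-1) ' ' = c := getD_rep c L rest (L-1) (by omega)
  intro j
  induction j using Nat.strong_induction_on with
  | _ j ih =>
    intro hj
    rcases j with _ | _ | _ | _ | j
    · simp only [Nat.add_zero]
      rw [dpF_zero, mul_one, hP]
    · -- j = 1
      conv_lhs => rw [dpF]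
      have hf : (rest.getD 0 ' ' = c) = False := eq_false (hhead (by omega))
      simp only [gr0, gl1, hf, and_false, if_false]
      rw [dpF_one, pvMul, mul_one, hP]
    · -- j = 2
      rw [show L + 2 = (L + 1) + 1 from by omega]
      conv_lhs => rw [dpF]
      have iA : L + 1 - 1 = L := by omega
      have iB : L + 1 - 2 = L - 1 := by omega
      have gr1 : (List.replicate L c ++ rest).getD (L+1) ' ' = rest.getD 1 ' ' := getD_right c L rest 1
      have gT : (2 ≤ L + 1 + 1) = True := eq_true (by omega)
      simp only [iA, iB, gr1, gr0, gl1, gT, true_and]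
      by_cases hc : rest.getD 1 ' ' = rest.getD 0 ' '
      · have h2 : (rest.getD 1 ' ' = c) = False :=
          eq_false fun h => hhead (by omega) (hc.symm.trans h)
        simp only [eq_true hc, if_true, h2, and_false, if_false]
        rw [ih 1 (by omega) (by omega), dpF_two, if_pos hc, pvMAdd, mul_one, pvMC]
      · simp only [eq_false hc, if_false]
        rw [ih 1 (by omega) (by omega), pvMC, dpF_two, if_neg hc, pvMul]
    · -- j = 3
      rw [show L + 3 = (L + 2) + 1 from by omega]
      conv_lhs => rw [dpF]
      have iA : L + 2 - 1 = L + 1 := by omega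
      have iB : L + 2 - 2 = L := by omega
      have iC : L + 2 - 3 = L - 1 := by omega
      have gr1 : (List.replicate L c ++ rest).getD (L+1) ' ' = rest.getD 1 ' ' := getD_right c L rest 1
      have gr2 : (List.replicate L c ++ rest).getD (L+2) ' ' = rest.getD 2 ' ' := getD_right c L rest 2
      have gT2 : (2 ≤ L + 2 + 1) = True := eq_true (by omega)
      have gT3 : (3 ≤ L + 2 + 1) = True := eq_true (by omega)
      simp only [iA, iB, iC, gr2, gr1, gr0, gl1, gT2, gT3, true_and]
      by_cases hc1 : rest.getD 2 ' ' = rest.getD 1 ' '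
      · by_cases hc2 : rest.getD 2 ' ' = rest.getD 0 ' '
        · have h3 : (rest.getD 2 ' ' = c) = False :=
            eq_false fun h => hhead (by omega) (hc2.symm.trans h)
          simp only [eq_true hc1, eq_true hc2, if_true, h3, and_false, if_false]
          rw [ih 2 (by omega) (by omega), ih 1 (by omega) (by omega),
              dpF_three, if_pos hc1, if_pos hc2, pvMAdd2, mul_one, pvMC, pvMB]
        · simp only [eq_true hc1, eq_false hc2, if_true, if_false]
          rw [ih 2 (by omega) (by omega), ih 1 (by omega) (by omega),
              dpF_three, if_pos hc1, if_neg hc2, pvMAdd, pvMC, pvMB]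
      · simp only [eq_false hc1, if_false]
        rw [ih 2 (by omega) (by omega), pvMC, dpF_three, if_neg hc1, pvMul]
    · -- j + 4 : every looked-up index lies inside rest
      rw [show L + (j + 4) = (L + (j + 3)) + 1 from by omega]
      conv_lhs => rw [dpF]
      conv_rhs => rw [show (j:Nat) + 4 = (j + 3) + 1 from by omega, dpF]
      have iA : L + (j + 3) - 1 = L + (j + 2) := by omega
      have iB : L + (j + 3) - 2 = L + (j + 1) := by omega
      have iC : L + (j + 3) - 3 = L + j := by omega
      have rA : j + 3 - 1 = j + 2 := by omega
      have rB : j + 3 - 2 = j + 1 := by omega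
      have rC : j + 3 - 3 = j := by omega
      have gT2 : (2 ≤ L + (j + 3) + 1) = True := eq_true (by omega)
      have gT3 : (3 ≤ L + (j + 3) + 1) = True := eq_true (by omega)
      have gT4 : (4 ≤ L + (j + 3) + 1) = True := eq_true (by omega)
      have gS2 : (2 ≤ j + 3 + 1) = True := eq_true (by omega)
      have gS3 : (3 ≤ j + 3 + 1) = True := eq_true (by omega)
      have gS4 : (4 ≤ j + 3 + 1) = True := eq_true (by omega)
      simp only [iA, iB, iC, rA, rB, rC, gT2, gT3, gT4, gS2, gS3, gS4, true_and,
        getD_right c L rest (j + 3), getD_right c L rest (j + 2),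
        getD_right c L rest (j + 1), getD_right c L rest j]
      rw [ih (j+3) (by omega) (by omega), ih (j+2) (by omega) (by omega),
          ih (j+1) (by omega) (by omega), ih j (by omega) (by omega)]
      split_ifs
      · rw [pvMAdd3]; simp only [pvMC, pvMB]
      · rw [pvMAdd2]; simp only [pvMC, pvMB]
      · rw [pvMAdd]; simp only [pvMC, pvMB]
      · rw [pvMul]; simp only [pvMC]

theorem takeRun_spec (c : Char) (t : List Char) :
    t = List.replicate (takeRun c t).1 c ++ (takeRun c t).2 ∧ (takeRun c t).2.head? ≠ some c := by
  induction t with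
  | nil => simp [takeRun]
  | cons d t ih =>
    by_cases h : d = c
    · subst h
      refine ⟨?_, by simpa [takeRun] using ih.2⟩
      conv_lhs => rw [ih.1]
      simp [takeRun, List.replicate_succ]
    · simp [takeRun, h]

theorem loopB_eq (cs : List Char) (total : Int) (ht : total % pvM = total) :
    loopB cs total = total * dpF cs cs.length % pvM := by
  suffices H : ∀ (n : Nat) (cs : List Char), cs.length ≤ n → ∀ (total : Int),
      total % pvM = total → loopB cs total = total * dpF cs cs.length % pvM from
    H cs.length cs (le_refl _) total ht
  intro n
  induction n with
  | zero =>
    intro cs hlen total ht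
    have hnil : cs = [] := by
      cases cs
      · rfl
      · simp at hlen
    subst hnil
    rw [loopB, List.length_nil, dpF_zero, mul_one, ht]
  | succ n ihn =>
    intro cs hlen total ht
    rcases cs with _ | ⟨c, t⟩
    · rw [loopB, List.length_nil, dpF_zero, mul_one, ht]
    · obtain ⟨hdec, hne⟩ := takeRun_spec c t
      have hct : c :: t = List.replicate ((takeRun c t).1 + 1) c ++ (takeRun c t).2 := by
        conv_lhs => rw [hdec]
        rw [List.replicate_succ, List.cons_append]
      have hl : limitOf c = 3 ∨ limitOf c = 4 := by
        unfold limitOf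
        split
        · exact Or.inr rfl
        · exact Or.inl rfl
      rw [loopB]
      rw [ihn (takeRun c t).2
            (by have := takeRun_len_le c t; simp only [List.length_cons] at hlen; omega)
            _ (pvMC _)]
      rw [show (if c = '7' ∨ c = '9' then (4:Nat) else 3) = limitOf c from rfl]
      rw [fTab_eq _ _ hl, getD_map_range _ _ _ (by omega)]
      conv_rhs => rw [hct]
      simp only [List.length_append, List.length_replicate]
      rw [dpF_scale c ((takeRun c t).1 + 1) (takeRun c t).2 (by omega) hne
            (takeRun c t).2.length (le_refl _)]
      rw [dpF_run c ((takeRun c t).1 + 1) (takeRun c t).2 ((takeRun c t).1 + 1) (le_refl _)]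
      exact pvAssoc _ _ _

-- ===== VERDICT (by name: the statement is the Claim_ definition above) =====
theorem countTexts_spec : Claim_equal_countTexts := by
  intro s _
  unfold Spec_countTexts countTexts_alt
  rw [countTexts_eq_dpF, loopB_eq s.toList 1 (by norm_num [pvM]), one_mul]
  cases hn : s.toList.length with
  | zero => rw [dpF_zero]; norm_num [pvM]
  | succ m => rw [dpF_mod]
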